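-- pv_equiv track=rewrite | github.com/ljdursi/rosalind_chapel | CORR/corr.py | find_neighbour
-- ===== SOURCE A (Python) =====
-- def find_neighbour(bad, good_seqs):
--     for seq in good_seqs:
--         edit_dist = 0
--         for badbase, goodbase in zip(bad, seq):
--             if badbase != goodbase:
--                 edit_dist += 1
--             if edit_dist > 1:
--                 break
--         if edit_dist == 1:
--             return seq
--     return ""
-- ===== SOURCE B (Python) =====
-- def find_neighbour(bad, good_seqs):
--     for seq in good_seqs:
--         k = min(len(bad), len(seq))
--         i = 0
--         while i < k and bad[i] == seq[i]:
--             i += 1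
--         if i < k and bad[i+1:k] == seq[i+1:k]:
--             return seq
--     return ""
-- ===== Notes on version B (the rewrite author's own statement) =====
-- stated objective: alternative
-- what changed: B replaces A's per-character mismatch counter (with break at 2) by locating the first mismatch position and then comparing the remaining slices for equality in one C-level slice comparison.
import Mathlib
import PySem

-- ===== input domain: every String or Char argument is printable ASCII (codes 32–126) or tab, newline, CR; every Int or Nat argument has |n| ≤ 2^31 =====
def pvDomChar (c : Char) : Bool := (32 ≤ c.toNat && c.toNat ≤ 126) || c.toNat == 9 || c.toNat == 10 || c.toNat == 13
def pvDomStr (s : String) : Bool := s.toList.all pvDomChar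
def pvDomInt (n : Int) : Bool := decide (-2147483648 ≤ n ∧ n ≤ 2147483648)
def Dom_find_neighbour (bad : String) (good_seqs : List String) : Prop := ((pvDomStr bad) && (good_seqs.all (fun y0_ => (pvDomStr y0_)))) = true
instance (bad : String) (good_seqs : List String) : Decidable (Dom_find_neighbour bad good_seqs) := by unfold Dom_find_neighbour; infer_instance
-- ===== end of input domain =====

-- B locates the first mismatch position and then compares the remaining slices for
-- equality, instead of A's per-character mismatch counter with break at 2 (objective: alternative).


-- ===== PORT A =====
-- inner loop of A: edit_dist accumulator over zip(bad, seq), breaking once it exceeds 1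
def pvEditA : List (Char × Char) → Int → Int
  | [], d => d
  | (b, g) :: rest, d =>
      let d' := if b ≠ g then d + 1 else d
      if d' > 1 then d' else pvEditA rest d'

def find_neighbour (bad : String) (good_seqs : List String) : String :=
  match good_seqs with
  | [] => ""
  | seq :: rest =>
      if pvEditA (bad.toList.zip seq.toList) 0 = 1 then seq
      else find_neighbour bad rest

-- ===== PORT B =====
-- B's while loop 'while i < k and bad[i] == seq[i]: i += 1' ported as structural recursion
-- consuming both character lists in step; at the first mismatch (i < k), the slice comparison
-- bad[i+1:k] == seq[i+1:k] is ported as equality of the remaining tails truncated to the common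
-- length k - i - 1 = min |bs| |ss| (exact: both Python slices are exactly these lists).
def pvScanB : List Char → List Char → Bool
  | b :: bs, s :: ss =>
      if b == s then pvScanB bs ss
      else
        let n := min bs.length ss.length
        bs.take n == ss.take n
  | _, _ => false  -- i reached k (one of the strings is exhausted): no mismatch found

def find_neighbour_alt (bad : String) (good_seqs : List String) : String :=
  match good_seqs with
  | [] => ""
  | seq :: rest =>
      if pvScanB bad.toList seq.toList then seq
      else find_neighbour_alt bad rest

-- ===== PRECONDITION & SPEC =====
def Spec_find_neighbour (bad : String) (good_seqs : List String) (out : String) : Prop := out = find_neighbour_alt bad good_seqs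
instance (bad : String) (good_seqs : List String) (out : String) : Decidable (Spec_find_neighbour bad good_seqs out) := by unfold Spec_find_neighbour; infer_instance

-- ===== CLAIM (what is proved, stated in full; the proofs are below) =====
def Claim_equal_find_neighbour : Prop := ∀ (bad : String) (good_seqs : List String), Dom_find_neighbour bad good_seqs → Spec_find_neighbour bad good_seqs (find_neighbour bad good_seqs)

-- ===== LEMMAS AND PROOFS =====

-- number of mismatching positions of a zipped list
def pvCnt (l : List (Char × Char)) : Nat := l.countP (fun p => p.1 != p.2)

theorem pvEditA_char (l : List (Char × Char)) :
    (pvEditA l 0 = 1 ↔ pvCnt l = 1) ∧ (pvEditA l 1 = 1 ↔ pvCnt l = 0) := by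
  induction l with
  | nil => simp [pvEditA, pvCnt]
  | cons p rest ih =>
      obtain ⟨b, g⟩ := p
      by_cases h : b = g
      · simpa [pvEditA, pvCnt, h] using ih
      · have e0 : pvEditA ((b, g) :: rest) 0 = pvEditA rest 1 := by simp [pvEditA, h]
        have e1 : pvEditA ((b, g) :: rest) 1 = 2 := by simp [pvEditA, h]
        have hc : pvCnt ((b, g) :: rest) = pvCnt rest + 1 := by
          simp [pvCnt, h]
        refine ⟨?_, ?_⟩
        · rw [e0, hc, ih.2]; omega
        · rw [e1, hc]; omega

theorem pvTake_eq_iff_cnt (bs ss : List Char) :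
    (bs.take (min bs.length ss.length) = ss.take (min bs.length ss.length)) ↔
      pvCnt (bs.zip ss) = 0 := by
  induction bs generalizing ss with
  | nil => simp [pvCnt]
  | cons b bs ih =>
      cases ss with
      | nil => simp [pvCnt]
      | cons s ss =>
          have hmin : min (b :: bs).length (s :: ss).length
              = min bs.length ss.length + 1 := by
            simp [Nat.succ_min_succ]
          by_cases h : b = s
          · simp [List.take_succ_cons, pvCnt, h, ih]
          · simp [List.take_succ_cons, pvCnt, h]

theorem pvScanB_char (bs ss : List Char) :
    pvScanB bs ss = true ↔ pvCnt (bs.zip ss) = 1 := by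
  induction bs generalizing ss with
  | nil => simp [pvScanB, pvCnt]
  | cons b bs ih =>
      cases ss with
      | nil => simp [pvScanB, pvCnt]
      | cons s ss =>
          by_cases h : b = s
          · simpa [pvScanB, h, pvCnt] using ih ss
          · have hc : pvCnt ((b :: bs).zip (s :: ss)) = pvCnt (bs.zip ss) + 1 := by
              simp [pvCnt, h]
            have e : pvScanB (b :: bs) (s :: ss)
                = (bs.take (min bs.length ss.length) == ss.take (min bs.length ss.length)) := by
              simp [pvScanB, h]
            rw [e, hc, beq_iff_eq, pvTake_eq_iff_cnt]
            omega

theorem pv_seq_iff (bs ss : List Char) :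
    pvEditA (bs.zip ss) 0 = 1 ↔ pvScanB bs ss = true := by
  rw [(pvEditA_char (bs.zip ss)).1, pvScanB_char]

theorem pv_all (bad : String) (gs : List String) :
    find_neighbour bad gs = find_neighbour_alt bad gs := by
  induction gs with
  | nil => simp [find_neighbour, find_neighbour_alt]
  | cons seq rest ih =>
      by_cases h : pvScanB bad.toList seq.toList = true
      · simp [find_neighbour, find_neighbour_alt, h, (pv_seq_iff _ _).2 h]
      · have hA : ¬ pvEditA (bad.toList.zip seq.toList) 0 = 1 :=
          fun hc => h ((pv_seq_iff _ _).1 hc)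
        simpa [find_neighbour, find_neighbour_alt, h, hA] using ih

-- ===== VERDICT (by name: the statement is the Claim_ definition above) =====
theorem find_neighbour_spec : Claim_equal_find_neighbour := by
  intro bad good_seqs _
  unfold Spec_find_neighbour
  exact pv_all bad good_seqs
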